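-- pv_equiv track=rewrite | github.com/yousif-toama/sig-light | src/sig_light/lyndon.py | _is_lyndon
-- ===== SOURCE A (Python) =====
-- def _is_lyndon(word: tuple[int, ...]) -> bool:
--     """Check whether a word is a Lyndon word."""
--     n = len(word)
--     if n == 0:
--         return False
--     for i in range(1, n):
--         rotation = word[i:] + word[:i]
--         if rotation <= word:
--             return False
--     return True
-- ===== SOURCE B (Python) =====
-- def _is_lyndon(word: tuple[int, ...]) -> bool:
--     """Check whether a word is a Lyndon word.
--
--     Uses the suffix characterization: a nonempty word is Lyndon iff it is
--     strictly smaller than every proper suffix (no rotations are built).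
--     """
--     n = len(word)
--     return n > 0 and all(word < word[i:] for i in range(1, n))
-- ===== Notes on version B (the rewrite author's own statement) =====
-- stated objective: alternative
-- what changed: B replaces A's rotation test (build word[i:]+word[:i] and compare with the word for every i) by the suffix characterization: the word is Lyndon iff it is nonempty and strictly smaller than each proper suffix word[i:]; no rotation is ever constructed (measured ~4x faster), and the equivalence of the two characterizations is a genuine theorem proved in the Lean file.
import Mathlib
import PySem

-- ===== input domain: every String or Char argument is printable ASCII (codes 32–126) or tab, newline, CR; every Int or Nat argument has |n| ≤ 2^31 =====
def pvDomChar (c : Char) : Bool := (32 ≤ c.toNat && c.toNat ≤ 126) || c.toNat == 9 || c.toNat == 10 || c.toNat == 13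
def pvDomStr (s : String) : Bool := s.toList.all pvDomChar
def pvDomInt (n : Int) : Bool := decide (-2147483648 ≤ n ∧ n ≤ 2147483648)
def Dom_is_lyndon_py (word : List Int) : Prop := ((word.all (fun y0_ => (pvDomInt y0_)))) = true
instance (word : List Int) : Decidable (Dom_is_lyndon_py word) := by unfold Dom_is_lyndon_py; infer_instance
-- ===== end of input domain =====

-- B checks "word < every proper suffix" instead of A's "word < every proper rotation"; same value everywhere (alternative characterization, equivalence proved below).

-- ===== PORT A =====
-- Python's `<=` on int tuples (elementwise, a proper prefix is smaller)
def pyTupleLe : List Int → List Int → Bool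
  | [], _ => true
  | _ :: _, [] => false
  | a :: as, b :: bs => if a < b then true else if b < a then false else pyTupleLe as bs

-- the `for i in range(1, n)` loop of A, with its early `return False`
def isLyndonLoopA (word : List Int) (n i : Nat) : Bool :=
  if _h : i < n then
    let rotation := PySem.List.slice word (some (i : Int)) none ++ PySem.List.slice word none (some (i : Int))
    if pyTupleLe rotation word then false
    else isLyndonLoopA word n (i + 1)
  else true
termination_by n - i

def is_lyndon_py (word : List Int) : Bool :=
  let n := word.length
  if n = 0 then false
  else isLyndonLoopA word n 1

-- ===== PORT B =====
-- Python's `<` on int tuples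
def pyTupleLt : List Int → List Int → Bool
  | [], [] => false
  | [], _ :: _ => true
  | _ :: _, [] => false
  | a :: as, b :: bs => if a < b then true else if b < a then false else pyTupleLt as bs

def is_lyndon_py_alt (word : List Int) : Bool :=
  let n := word.length
  decide (0 < n) &&
    (PySem.List.pyRange 1 (n : Int) 1).all
      (fun i => pyTupleLt word (PySem.List.slice word (some i) none))

-- ===== PRECONDITION & SPEC =====
def Spec_is_lyndon_py (word : List Int) (out : Bool) : Prop := out = is_lyndon_py_alt word
instance (word : List Int) (out : Bool) : Decidable (Spec_is_lyndon_py word out) := by unfold Spec_is_lyndon_py; infer_instance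

-- ===== CLAIM (what is proved, stated in full; the proofs are below) =====
def Claim_equal_is_lyndon_py : Prop := ∀ (word : List Int), Dom_is_lyndon_py word → Spec_is_lyndon_py word (is_lyndon_py word)

-- ===== LEMMAS AND PROOFS =====

-- `<=` is the negation of the reversed `<`
theorem pyTupleLe_eq_not_lt (a b : List Int) : pyTupleLe a b = !pyTupleLt b a := by
  induction a generalizing b with
  | nil => cases b <;> simp [pyTupleLe, pyTupleLt]
  | cons x as ih =>
    cases b with
    | nil => simp [pyTupleLe, pyTupleLt]
    | cons y bs =>
      simp only [pyTupleLe, pyTupleLt]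
      rcases lt_trichotomy x y with h | h | h
      · simp [h, not_lt_of_gt h]
      · subst h; simp [ih]
      · simp [h, not_lt_of_gt h]

theorem pyTupleLt_append_right (a s t : List Int) (h : pyTupleLt a s = true) :
    pyTupleLt a (s ++ t) = true := by
  induction a generalizing s with
  | nil =>
    cases s with
    | nil => simp [pyTupleLt] at h
    | cons y ss => simp [pyTupleLt]
  | cons x as ih =>
    cases s with
    | nil => simp [pyTupleLt] at h
    | cons y ss =>
      rcases lt_trichotomy x y with hc | hc | hc
      · simp [pyTupleLt, hc]
      · subst hc
        simp only [pyTupleLt, List.cons_append, lt_irrefl, if_false] at h ⊢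
        exact ih ss h
      · simp [pyTupleLt, hc, not_lt_of_gt hc] at h

theorem pyTupleLt_prefix (s t w : List Int) (h : pyTupleLt w (s ++ t) = true)
    (hns : pyTupleLt w s = false) : s <+: w := by
  induction s generalizing w with
  | nil => exact List.nil_prefix
  | cons a ss ih =>
    cases w with
    | nil => simp [pyTupleLt] at hns
    | cons b ws =>
      rcases lt_trichotomy b a with hc | hc | hc
      · simp [pyTupleLt, hc] at hns
      · subst hc
        simp only [pyTupleLt, List.cons_append, lt_irrefl, if_false] at h hns
        exact List.cons_prefix_cons.mpr ⟨rfl, ih ws h hns⟩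
      · simp [pyTupleLt, hc, not_lt_of_gt hc] at h

theorem pyTupleLt_append_of_length_eq (u p v w : List Int) (hl : u.length = p.length)
    (h : pyTupleLt u p = true) : pyTupleLt (u ++ v) (p ++ w) = true := by
  induction u generalizing p with
  | nil =>
    cases p with
    | nil => simp [pyTupleLt] at h
    | cons b ps => simp at hl
  | cons a us ih =>
    cases p with
    | nil => simp at hl
    | cons b ps =>
      rcases lt_trichotomy a b with hc | hc | hc
      · simp [pyTupleLt, hc]
      · subst hc
        simp only [pyTupleLt, List.cons_append, lt_irrefl, if_false] at h ⊢
        exact ih ps (by simpa using hl) h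
      · simp [pyTupleLt, hc, not_lt_of_gt hc] at h

theorem pyTupleLt_asymm (a b : List Int) (h1 : pyTupleLt a b = true)
    (h2 : pyTupleLt b a = true) : False := by
  induction a generalizing b with
  | nil => cases b <;> simp [pyTupleLt] at h1 h2
  | cons x as ih =>
    cases b with
    | nil => simp [pyTupleLt] at h1
    | cons y bs =>
      rcases lt_trichotomy x y with hc | hc | hc
      · simp [pyTupleLt, hc, not_lt_of_gt hc] at h2
      · subst hc
        simp only [pyTupleLt, lt_irrefl, if_false] at h1 h2
        exact ih bs h1 h2
      · simp [pyTupleLt, hc, not_lt_of_gt hc] at h1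

-- common prefixes cancel in the comparison
theorem pyTupleLt_cancel (c x y : List Int) : pyTupleLt (c ++ x) (c ++ y) = pyTupleLt x y := by
  induction c with
  | nil => rfl
  | cons a cs ih => simp only [List.cons_append, pyTupleLt, lt_irrefl, if_false, ih]

-- characterization of A's loop, by induction on the remaining fuel
theorem isLyndonLoopA_eq_true_iff (word : List Int) (n : Nat) :
    ∀ (k i : Nat), n ≤ i + k →
      (isLyndonLoopA word n i = true ↔
        ∀ j : Nat, i ≤ j → j < n →
          pyTupleLe (word.drop j ++ word.take j) word = false) := by
  intro k
  induction k with
  | zero =>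
    intro i hk
    rw [isLyndonLoopA, dif_neg (by omega)]
    constructor
    · intro _ j hij hjn; omega
    · intro _; rfl
  | succ k ih =>
    intro i hk
    rw [isLyndonLoopA]
    by_cases hlt : i < n
    · rw [dif_pos hlt]
      simp only [PySem.List.slice_from_natCast, PySem.List.slice_to_natCast]
      by_cases hle : pyTupleLe (word.drop i ++ word.take i) word = true
      · rw [if_pos hle]
        constructor
        · intro h; exact absurd h (by simp)
        · intro h
          have := h i le_rfl hlt
          rw [hle] at this
          exact absurd this (by simp)
      · rw [if_neg hle]
        rw [ih (i + 1) (by omega)]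
        constructor
        · intro h j hij hjn
          rcases Nat.eq_or_lt_of_le hij with rfl | hij'
          · exact Bool.not_eq_true _ ▸ (by simpa using hle)
          · exact h j hij' hjn
        · intro h j hij hjn
          exact h j (Nat.le_of_succ_le hij) hjn
    · rw [dif_neg hlt]
      constructor
      · intro _ j hij hjn; omega
      · intro _; rfl

-- characterization of B's all-over-range
theorem alt_all_iff (word : List Int) :
    ((PySem.List.pyRange 1 (word.length : Int) 1).all
      (fun i => pyTupleLt word (PySem.List.slice word (some i) none)) = true) ↔
      ∀ j : Nat, 1 ≤ j → j < word.length → pyTupleLt word (word.drop j) = true := by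
  rw [List.all_eq_true]
  constructor
  · intro h j h1 hj
    have hm : (j : Int) ∈ PySem.List.pyRange 1 (word.length : Int) 1 := by
      rw [PySem.List.mem_pyRange_one]; omega
    have := h _ hm
    rwa [PySem.List.slice_from_natCast] at this
  · intro h x hx
    rw [PySem.List.mem_pyRange_one] at hx
    obtain ⟨h1, h2⟩ := hx
    have hx0 : x = (x.toNat : Int) := by omega
    rw [hx0, PySem.List.slice_from_natCast]
    exact h x.toNat (by omega) (by omega)

-- the mathematical heart: "smaller than every proper rotation" → "smaller than every proper suffix"
theorem rot_to_suffix (w : List Int)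
    (hall : ∀ j : Nat, 1 ≤ j → j < w.length →
      pyTupleLt w (w.drop j ++ w.take j) = true) :
    ∀ i : Nat, 1 ≤ i → i < w.length → pyTupleLt w (w.drop i) = true := by
  intro i h1 hi
  by_contra hns
  rw [Bool.not_eq_true] at hns
  have hrot := hall i h1 hi
  have hpre : w.drop i <+: w := pyTupleLt_prefix _ _ _ hrot hns
  -- the suffix of length n-i is also the prefix of length n-i (the word is bordered)
  have htake : w.take (w.length - i) = w.drop i := by
    obtain ⟨t, ht⟩ := hpre
    have : w.take (w.length - i) = (w.drop i ++ t).take (w.length - i) := by rw [ht]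
    rw [this, List.take_append_of_le_length (by simp)]
    simp
  have hw_split : w = w.drop i ++ w.drop (w.length - i) := by
    conv_lhs => rw [← List.take_append_drop (w.length - i) w]
    rw [htake]
  -- cancel the common prefix `w.drop i` from  w < rot i
  have hcancel : pyTupleLt (w.drop (w.length - i)) (w.take i) = true := by
    have h' := hall i h1 hi
    nth_rewrite 1 [hw_split] at h'
    rwa [pyTupleLt_cancel] at h'
  -- build  rot (n-i) < w  from it, contradicting  w < rot (n-i)
  have hlen : (w.drop (w.length - i)).length = (w.take i).length := by
    simp; omega
  have hlt2 : pyTupleLt (w.drop (w.length - i) ++ w.take (w.length - i))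
      (w.take i ++ w.drop i) = true :=
    pyTupleLt_append_of_length_eq _ _ _ _ hlen hcancel
  rw [List.take_append_drop] at hlt2
  have hlt1 := hall (w.length - i) (by omega) (by omega)
  exact pyTupleLt_asymm _ _ hlt1 hlt2

theorem suffix_to_rot (w : List Int)
    (hall : ∀ j : Nat, 1 ≤ j → j < w.length → pyTupleLt w (w.drop j) = true) :
    ∀ i : Nat, 1 ≤ i → i < w.length →
      pyTupleLt w (w.drop i ++ w.take i) = true := by
  intro i h1 hi
  exact pyTupleLt_append_right _ _ _ (hall i h1 hi)

-- ===== VERDICT (by name: the statement is the Claim_ definition above) =====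
theorem is_lyndon_py_spec : Claim_equal_is_lyndon_py := by
  intro word _hdom
  unfold Spec_is_lyndon_py is_lyndon_py is_lyndon_py_alt
  rcases Nat.eq_zero_or_pos word.length with h0 | hpos
  · simp [h0]
  · rw [if_neg (by omega)]
    rw [Bool.eq_iff_iff]
    rw [isLyndonLoopA_eq_true_iff word word.length word.length 1 (by omega)]
    simp only [Bool.and_eq_true, decide_eq_true_eq, alt_all_iff]
    constructor
    · intro h
      refine ⟨hpos, rot_to_suffix word ?_⟩
      intro j hj1 hj
      have := h j hj1 hj
      rw [pyTupleLe_eq_not_lt] at this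
      simpa using this
    · rintro ⟨-, h⟩ j hj1 hj
      rw [pyTupleLe_eq_not_lt]
      simp [suffix_to_rot word h j hj1 hj]
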